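-- pv_equiv track=rewrite | github.com/no-more-coffee/my-interview-questions | checkio/stressful-subject.py | is_stressful
-- ===== SOURCE A (Python) =====
-- from functools import reduce
--
-- red_words = ("help", "asap", "urgent")
--
-- def is_stressful(subj):
--     """
--         recoognise stressful subject
--     """
--     if subj.endswith('!!!'):
--         return True
--
--     subj = ''.join(filter(lambda x: x.isalpha(), subj))
--     if subj.isupper():
--         return True
--
--     subj = ''.join(reduce((lambda res, x: res if res.endswith(x) else (res + x)), subj.lower()))
--     for i in red_words:
--         if i in subj:
--             return True
--
--     return False
-- ===== SOURCE B (Python) =====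
-- RED_WORDS = ("help", "asap", "urgent")
--
--
-- def _match_runs(s, w):
--     # does s contain w with each letter possibly repeated (h+e+l+p+ ...)?
--     n = len(s)
--     for i in range(n):
--         j = i
--         ok = True
--         for c in w:
--             if j < n and s[j] == c:
--                 while j < n and s[j] == c:
--                     j += 1
--             else:
--                 ok = False
--                 break
--         if ok:
--             return True
--     return False
--
--
-- def is_stressful(subj):
--     if subj.endswith('!!!'):
--         return True
--     letters = [c for c in subj if c.isalpha()]
--     if letters and all(c.isupper() for c in letters):
--         return True
--     s = ''.join(letters).lower()
--     return any(_match_runs(s, w) for w in RED_WORDS)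
-- ===== Notes on version B (the rewrite author's own statement) =====
-- stated objective: faster
-- what changed: B drops A's reduce-based collapse of repeated letters (built by repeated string concatenation) followed by substring search, and instead scans the lowercased alpha-only string once per keyword with a run-tolerant matcher in which each keyword letter consumes a maximal run of that letter (the h+e+l+p+ pattern idea, hand-coded).
-- outside the precondition, e.g. on is_stressful('123?'): A raises TypeError, B returns False
import Mathlib
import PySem

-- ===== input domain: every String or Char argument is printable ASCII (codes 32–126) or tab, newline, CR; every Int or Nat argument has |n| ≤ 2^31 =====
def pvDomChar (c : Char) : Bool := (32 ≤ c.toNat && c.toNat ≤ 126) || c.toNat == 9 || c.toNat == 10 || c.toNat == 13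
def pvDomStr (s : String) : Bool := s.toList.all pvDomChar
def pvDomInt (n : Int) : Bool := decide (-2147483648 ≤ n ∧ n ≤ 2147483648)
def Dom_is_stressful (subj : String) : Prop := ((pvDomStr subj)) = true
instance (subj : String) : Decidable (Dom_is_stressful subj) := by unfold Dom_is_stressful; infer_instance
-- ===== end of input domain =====

-- B replaces A's reduce-based duplicate-collapse + substring scan by a direct run-tolerant
-- keyword matcher (each keyword letter matches a maximal run of that letter); objective: alternative.

-- ===== PORT A =====
-- literal port of A; strings are handled as their char lists (PySem.Chars are the definitions)
def is_stressful (subj : String) : Bool :=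
  if PySem.Str.endswith subj "!!!" then true
  else
    let filtered := subj.toList.filter PySem.Chars.isalpha
    -- subj.isupper(): some cased char, and no lowercase one (exact on the ASCII domain)
    if (filtered.any fun c => PySem.Chars.islower c || PySem.Chars.isupper c)
        && (filtered.all fun c => !PySem.Chars.islower c) then true
    else
      match PySem.Chars.lower filtered with
      | [] => false   -- Python's reduce() raises TypeError on the empty iterable; outside Pre_
      | c :: rest =>
        let collapsed := rest.foldl (fun res x =>
            if PySem.Chars.endswith res [x] then res else res ++ [x]) [c]
        if PySem.Chars.isIn "help".toList collapsed then true
        else if PySem.Chars.isIn "asap".toList collapsed then true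
        else if PySem.Chars.isIn "urgent".toList collapsed then true
        else false

-- ===== PORT B =====
-- inner while loop of Source B's _match_runs: skip the run of chars equal to c
def pvSkipRun (c : Char) : List Char → List Char
  | [] => []
  | x :: l => if x = c then pvSkipRun c l else x :: l

-- the per-start 'for c in w' loop of _match_runs
def pvMatchAt : List Char → List Char → Bool
  | _, [] => true
  | [], _ :: _ => false
  | x :: l, c :: w => if x = c then pvMatchAt (pvSkipRun c l) w else false

-- the outer 'for i in range(len(s))' loop of _match_runs (one suffix per start index)
def pvRunSearch (w : List Char) : List Char → Bool
  | [] => false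
  | x :: l => pvMatchAt (x :: l) w || pvRunSearch w l

def is_stressful_alt (subj : String) : Bool :=
  if PySem.Str.endswith subj "!!!" then true
  else
    let letters := subj.toList.filter PySem.Chars.isalpha
    if !letters.isEmpty && letters.all PySem.Chars.isupper then true
    else
      let s := letters.map PySem.Chars.lowerChar
      ["help", "asap", "urgent"].any fun w => pvRunSearch (String.toList w) s

-- ===== PRECONDITION & SPEC =====
-- Pre_ excludes exactly the subjects with no alphabetic character and no triple-exclamation suffix,
-- on which A's reduce() raises TypeError (A returns no value there).
def Pre_is_stressful (subj : String) : Prop :=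
  PySem.Str.endswith subj "!!!" = true ∨ subj.toList.any PySem.Chars.isalpha = true
instance (subj : String) : Decidable (Pre_is_stressful subj) := by unfold Pre_is_stressful; infer_instance
def pvWitness_is_stressful : String := "Help me now"

def Spec_is_stressful (subj : String) (out : Bool) : Prop := out = is_stressful_alt subj
instance (subj : String) (out : Bool) : Decidable (Spec_is_stressful subj out) := by unfold Spec_is_stressful; infer_instance

-- ===== CLAIM (what is proved, stated in full; the proofs are below) =====
def Claim_equal_is_stressful : Prop := ∀ (subj : String), Dom_is_stressful subj → Pre_is_stressful subj → Spec_is_stressful subj (is_stressful subj)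

-- ===== LEMMAS AND PROOFS =====

-- the duplicate-collapse A's reduce computes, as a plain recursion
def pvCollTail (p : Char) : List Char → List Char
  | [] => []
  | x :: l => if x = p then pvCollTail p l else x :: pvCollTail x l

def pvCollapse : List Char → List Char
  | [] => []
  | c :: l => c :: pvCollTail c l

theorem pvCollTail_eq_collapse_skipRun (c : Char) (l : List Char) :
    pvCollTail c l = pvCollapse (pvSkipRun c l) := by
  induction l generalizing c with
  | nil => rfl
  | cons x l ih =>
    simp only [pvCollTail, pvSkipRun]
    by_cases h : x = c
    · simp [h, ih c]
    · simp [h, pvCollapse]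

theorem pvSingleton_suffix_iff (x c : Char) (ys : List Char) :
    [x] <:+ (ys ++ [c]) ↔ x = c := by
  constructor
  · rintro ⟨t, ht⟩
    have := congrArg List.getLast? ht
    simpa using this
  · rintro rfl; exact ⟨ys, rfl⟩

-- A-side bridge: the reduce-fold builds exactly pvCollapse
theorem pvFoldl_collapse (l : List Char) (pre : List Char) (c : Char) :
    l.foldl (fun res x => if PySem.Chars.endswith res [x] then res else res ++ [x])
      (pre ++ [c]) = pre ++ [c] ++ pvCollTail c l := by
  induction l generalizing pre c with
  | nil => simp [pvCollTail]
  | cons x l ih =>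
    simp only [List.foldl_cons]
    by_cases h : x = c
    · subst h
      have he : PySem.Chars.endswith (pre ++ [x]) [x] = true := by
        rw [PySem.Chars.endswith_iff, pvSingleton_suffix_iff]
      rw [if_pos he, ih pre x]
      simp [pvCollTail]
    · have he : PySem.Chars.endswith (pre ++ [c]) [x] = false := by
        rw [Bool.eq_false_iff]
        intro hc
        exact h ((pvSingleton_suffix_iff x c pre).1 ((PySem.Chars.endswith_iff _ _).1 hc))
      rw [if_neg (by simp [he])]
      rw [show pre ++ [c] ++ [x] = (pre ++ [c]) ++ [x] by simp, ih (pre ++ [c]) x]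
      simp [pvCollTail, h]

theorem pvMatchAt_iff (w : List Char) (s : List Char) :
    pvMatchAt s w = true ↔ w <+: pvCollapse s := by
  induction w generalizing s with
  | nil => cases s <;> simp [pvMatchAt]
  | cons c w ih =>
    cases s with
    | nil => simp [pvMatchAt, pvCollapse]
    | cons x l =>
      simp only [pvMatchAt, pvCollapse]
      by_cases h : x = c
      · subst h
        rw [if_pos rfl, ih (pvSkipRun x l), ← pvCollTail_eq_collapse_skipRun]
        simp [List.cons_prefix_cons]
      · simp [h, List.cons_prefix_cons, Ne.symm h]

theorem pvCollapse_cons_infix (x : Char) (l : List Char) :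
    pvCollapse l <:+: pvCollapse (x :: l) := by
  cases l with
  | nil => simp [pvCollapse]
  | cons y m =>
    by_cases h : y = x
    · subst h
      have : pvCollapse (y :: y :: m) = pvCollapse (y :: m) := by
        simp [pvCollapse, pvCollTail]
      rw [this]
    · have : pvCollapse (x :: y :: m) = x :: pvCollapse (y :: m) := by
        simp [pvCollapse, pvCollTail, h]
      rw [this]
      exact (List.suffix_cons x _).isInfix

theorem pvSkipRun_suffix (c : Char) (l : List Char) : pvSkipRun c l <:+ l := by
  induction l with
  | nil => simp [pvSkipRun]
  | cons x l ih =>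
    simp only [pvSkipRun]
    by_cases h : x = c
    · simp only [h]
      exact ih.trans (List.suffix_cons c l)
    · simp [h]

theorem pvRunSearch_mono (w t s : List Char) (hts : t <:+ s)
    (h : pvRunSearch w t = true) : pvRunSearch w s = true := by
  induction s with
  | nil => rw [List.suffix_nil.mp hts] at h; exact h
  | cons x l ih =>
    rcases List.suffix_cons_iff.mp hts with rfl | hl
    · exact h
    · simp only [pvRunSearch, Bool.or_eq_true]
      exact Or.inr (ih hl)

theorem pvRunSearch_iff (w : List Char) (hw : w ≠ []) (s : List Char) :
    pvRunSearch w s = true ↔ w <:+: pvCollapse s := by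
  induction hn : s.length using Nat.strong_induction_on generalizing s with
  | _ n ih =>
    cases s with
    | nil =>
      simp only [pvRunSearch, pvCollapse]
      constructor
      · intro h; cases h
      · intro h; exact absurd (List.eq_nil_of_infix_nil h) hw
    | cons x l =>
      simp only [pvRunSearch, Bool.or_eq_true]
      constructor
      · rintro (hm | hr)
        · exact ((pvMatchAt_iff w (x :: l)).1 hm).isInfix
        · have hl : pvRunSearch w l = true ↔ w <:+: pvCollapse l :=
            ih l.length (by simp [← hn]) l rfl
          exact (hl.1 hr).trans (pvCollapse_cons_infix x l)
      · intro hinf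
        have : pvCollapse (x :: l) = x :: pvCollTail x l := rfl
        rw [this, List.infix_cons_iff] at hinf
        rcases hinf with hp | hi
        · exact Or.inl ((pvMatchAt_iff w (x :: l)).2 hp)
        · rw [pvCollTail_eq_collapse_skipRun] at hi
          have hlen : (pvSkipRun x l).length < n := by
            have := (pvSkipRun_suffix x l).length_le
            simp [← hn]; omega
          have := (ih (pvSkipRun x l).length hlen (pvSkipRun x l) rfl).2 hi
          exact Or.inr (pvRunSearch_mono w (pvSkipRun x l) l (pvSkipRun_suffix x l) this)

theorem pvAlpha_cased (c : Char) (h : PySem.Chars.isalpha c = true) :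
    (PySem.Chars.islower c || PySem.Chars.isupper c) = true := by
  simp only [PySem.Chars.isalpha] at h
  rw [Bool.or_comm]; exact h

theorem pvAlpha_upper (c : Char) (h : PySem.Chars.isalpha c = true) :
    (!PySem.Chars.islower c) = PySem.Chars.isupper c := by
  have h' : PySem.Chars.isupper c = true ∨ PySem.Chars.islower c = true := by
    simpa [PySem.Chars.isalpha] using h
  rw [Bool.eq_iff_iff]
  simp only [PySem.Chars.islower, PySem.Chars.isupper, Bool.not_eq_true', Bool.and_eq_false_iff,
    Bool.and_eq_true, decide_eq_true_eq, decide_eq_false_iff_not, not_le, Char.le_def,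
    UInt32.le_iff_toNat_le] at *
  have h1 : ('a').val.toNat = 97 := rfl
  have h2 : ('z').val.toNat = 122 := rfl
  have h3 : ('A').val.toNat = 65 := rfl
  have h4 : ('Z').val.toNat = 90 := rfl
  omega

theorem pvGuard_eq (letters : List Char)
    (halpha : ∀ c ∈ letters, PySem.Chars.isalpha c = true) :
    ((letters.any fun c => PySem.Chars.islower c || PySem.Chars.isupper c)
        && (letters.all fun c => !PySem.Chars.islower c))
      = (!letters.isEmpty && letters.all PySem.Chars.isupper) := by
  congr 1
  · cases letters with
    | nil => rfl
    | cons c l =>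
      simp only [List.any_cons, List.isEmpty_cons, Bool.not_false]
      rw [pvAlpha_cased c (halpha c (List.mem_cons_self))]
      simp
  · rw [Bool.eq_iff_iff]
    simp only [List.all_eq_true]
    exact ⟨fun H c hc => by rw [← pvAlpha_upper c (halpha c hc)]; exact H c hc,
           fun H c hc => by rw [pvAlpha_upper c (halpha c hc)]; exact H c hc⟩

theorem pvKeyword_stage (L : List Char) (c : Char) (rest : List Char) (hL : L = c :: rest) :
    (if PySem.Chars.isIn "help".toList (rest.foldl (fun res x =>
          if PySem.Chars.endswith res [x] then res else res ++ [x]) [c]) then true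
      else if PySem.Chars.isIn "asap".toList (rest.foldl (fun res x =>
          if PySem.Chars.endswith res [x] then res else res ++ [x]) [c]) then true
      else if PySem.Chars.isIn "urgent".toList (rest.foldl (fun res x =>
          if PySem.Chars.endswith res [x] then res else res ++ [x]) [c]) then true
      else false)
    = (["help", "asap", "urgent"].any fun w => pvRunSearch (String.toList w) L) := by
  have hcoll : rest.foldl (fun res x =>
      if PySem.Chars.endswith res [x] then res else res ++ [x]) [c] = pvCollapse L := by
    have := pvFoldl_collapse rest [] c
    simpa [hL, pvCollapse] using this
  rw [hcoll]
  have key : ∀ w : List Char, w ≠ [] →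
      PySem.Chars.isIn w (pvCollapse L) = pvRunSearch w L := by
    intro w hw
    rw [Bool.eq_iff_iff]
    exact (PySem.Chars.isIn_iff_infix _ _).trans (pvRunSearch_iff w hw L).symm
  simp only [List.any_cons, List.any_nil]
  rw [show (String.toList "help") = ['h','e','l','p'] from rfl,
      show (String.toList "asap") = ['a','s','a','p'] from rfl,
      show (String.toList "urgent") = ['u','r','g','e','n','t'] from rfl]
  rw [key ['h','e','l','p'] (by simp), key ['a','s','a','p'] (by simp),
      key ['u','r','g','e','n','t'] (by simp)]
  cases pvRunSearch ['h','e','l','p'] L <;>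
    cases pvRunSearch ['a','s','a','p'] L <;>
      cases pvRunSearch ['u','r','g','e','n','t'] L <;> rfl

-- ===== VERDICT (by name: the statement is the Claim_ definition above) =====
theorem is_stressful_spec : Claim_equal_is_stressful := by
  intro subj _ hpre
  unfold Spec_is_stressful is_stressful is_stressful_alt
  by_cases hbang : PySem.Str.endswith subj "!!!" = true
  · rw [if_pos hbang, if_pos hbang]
  · rw [if_neg hbang, if_neg hbang]
    have hany : subj.toList.any PySem.Chars.isalpha = true := by
      rcases hpre with h | h
      · exact absurd h hbang
      · exact h
    simp only []
    set letters := subj.toList.filter PySem.Chars.isalpha with hlet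
    have halpha : ∀ c ∈ letters, PySem.Chars.isalpha c = true := by
      intro c hc; exact List.of_mem_filter hc
    rw [pvGuard_eq letters halpha]
    by_cases hguard : (!letters.isEmpty && letters.all PySem.Chars.isupper) = true
    · rw [if_pos hguard, if_pos hguard]
    · rw [if_neg hguard, if_neg hguard]
      have hne : letters ≠ [] := by
        rcases List.any_eq_true.mp hany with ⟨c, hc, hca⟩
        intro h
        exact absurd (List.mem_filter.mpr ⟨hc, hca⟩) (by simp [← hlet, h])
      rcases hL : PySem.Chars.lower letters with _ | ⟨c, rest⟩
      · exact absurd (by simpa [PySem.Chars.lower] using hL) hne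
      · have hL' : List.map PySem.Chars.lowerChar letters = c :: rest := hL
        rw [hL']
        exact pvKeyword_stage (c :: rest) c rest rfl
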